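-- pv_equiv track=rewrite | github.com/wilmurillo-ai/Design-Assistant | .skills/openclaw-skills/skills/tristanmanchester/audit-openclaw-security/scripts/render_report.py | normalise_sev
-- ===== SOURCE A (Python) =====
-- SEV_ORDER = {"critical": 0, "high": 1, "medium": 2, "low": 3, "info": 4, "unknown": 9}
--
-- def normalise_sev(raw: str) -> str:
--     s = (raw or "").strip().lower()
--     if not s:
--         return "unknown"
--     if "/" in s:
--         parts = [p.strip() for p in s.split("/") if p.strip()]
--         if "critical" in parts:
--             return "critical"
--         if "high" in parts:
--             return "high"
--         if "warn" in parts or "warning" in parts or "medium" in parts: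
--             return "medium"
--         if "low" in parts:
--             return "low"
--         if "info" in parts:
--             return "info"
--         return parts[0] if parts else "unknown"
--     if s in ("warn", "warning"):
--         return "medium"
--     if s == "crit":
--         return "critical"
--     return s if s in SEV_ORDER else s
-- ===== SOURCE B (Python) =====
-- _RANK = {"critical": 0, "high": 1, "medium": 2, "low": 3, "info": 4}
-- _ALIAS = {"warn": "medium", "warning": "medium", "crit": "critical"}
--
-- def normalise_sev(raw: str) -> str:
--     s = (raw or "").strip().lower()
--     if not s:
--         return "unknown"
--     if "/" not in s:
--         return _ALIAS.get(s, s)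
--     parts = [p.strip() for p in s.split("/") if p.strip()]
--     best = None
--     for p in parts:
--         c = "medium" if p in ("warn", "warning") else p
--         r = _RANK.get(c)
--         if r is not None and (best is None or r < best[0]):
--             best = (r, c)
--     if best is not None:
--         return best[1]
--     return "unknown" if not parts else parts[0]
-- ===== Notes on version B (the rewrite author's own statement) =====
-- stated objective: alternative
-- what changed: Replaces A's five-membership-test priority cascade over the slash parts by a single pass that canonicalises each part (warn/warning->medium), looks up its numeric rank and keeps the minimum-rank candidate, returning the best label found; the non-slash path becomes one alias-dict lookup with identity fallback.
import Mathlib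
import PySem

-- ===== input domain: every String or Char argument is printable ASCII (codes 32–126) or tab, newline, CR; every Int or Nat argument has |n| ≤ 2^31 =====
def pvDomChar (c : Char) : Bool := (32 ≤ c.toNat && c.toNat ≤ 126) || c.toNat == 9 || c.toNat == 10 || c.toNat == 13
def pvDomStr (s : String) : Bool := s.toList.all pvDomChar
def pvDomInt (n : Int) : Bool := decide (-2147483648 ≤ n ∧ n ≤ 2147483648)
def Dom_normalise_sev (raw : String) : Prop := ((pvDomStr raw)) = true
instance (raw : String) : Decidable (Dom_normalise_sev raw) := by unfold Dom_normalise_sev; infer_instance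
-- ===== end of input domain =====

-- B replaces A's priority if-cascade by a one-pass minimum-rank selection over the
-- slash-separated parts (objective: alternative algorithm, same cost).

-- ===== PORT A =====
def pvSEV_ORDER : PySem.Dict String Int :=
  PySem.Dict.ofList [("critical", 0), ("high", 1), ("medium", 2), ("low", 3), ("info", 4), ("unknown", 9)]

def normalise_sev (raw : String) : String :=
  let s := PySem.Str.lower (PySem.Str.strip (if raw == "" then "" else raw))
  if s == "" then "unknown"
  else if PySem.Str.isIn "/" s then
    let parts : List String := (((PySem.Str.split? s "/").getD []).map PySem.Str.strip).filter (fun q => !(q == ""))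
    if parts.contains "critical" then "critical"
    else if parts.contains "high" then "high"
    else if parts.contains "warn" || parts.contains "warning" || parts.contains "medium" then "medium"
    else if parts.contains "low" then "low"
    else if parts.contains "info" then "info"
    else match parts with
      | [] => "unknown"
      | h :: _ => h
  else if s == "warn" || s == "warning" then "medium"
  else if s == "crit" then "critical"
  else if pvSEV_ORDER.contains s then s else s

-- ===== PORT B =====
def pvRANK : PySem.Dict String Int :=
  PySem.Dict.ofList [("critical", 0), ("high", 1), ("medium", 2), ("low", 3), ("info", 4)]

def pvALIAS : PySem.Dict String String :=
  PySem.Dict.ofList [("warn", "medium"), ("warning", "medium"), ("crit", "critical")]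

def normalise_sev_alt (raw : String) : String :=
  let s := PySem.Str.lower (PySem.Str.strip (if raw == "" then "" else raw))
  if s == "" then "unknown"
  else if !(PySem.Str.isIn "/" s) then PySem.Dict.getD pvALIAS s s
  else
    let parts : List String := (((PySem.Str.split? s "/").getD []).map PySem.Str.strip).filter (fun q => !(q == ""))
    let best : Option (Int × String) := parts.foldl (fun best p =>
      let c := if p == "warn" || p == "warning" then "medium" else p
      match PySem.Dict.get? pvRANK c with
      | none => best
      | some r => match best with
        | none => some (r, c)
        | some (br, bc) => if r < br then some (r, c) else some (br, bc)) none
    match best with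
    | some (_, c) => c
    | none => match parts with | [] => "unknown" | h :: _ => h

-- ===== PRECONDITION & SPEC =====
def Spec_normalise_sev (raw : String) (out : String) : Prop := out = normalise_sev_alt raw
instance (raw : String) (out : String) : Decidable (Spec_normalise_sev raw out) := by unfold Spec_normalise_sev; infer_instance

-- ===== CLAIM (what is proved, stated in full; the proofs are below) =====
def Claim_equal_normalise_sev : Prop := ∀ (raw : String), Dom_normalise_sev raw → Spec_normalise_sev raw (normalise_sev raw)

-- ===== LEMMAS AND PROOFS =====

-- B's loop step, merge and spec-level candidate, used only by the proofs
def pvStep (best : Option (Int × String)) (p : String) : Option (Int × String) :=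
  let c := if p == "warn" || p == "warning" then "medium" else p
  match PySem.Dict.get? pvRANK c with
  | none => best
  | some r => match best with
    | none => some (r, c)
    | some (br, bc) => if r < br then some (r, c) else some (br, bc)

def pvCand (p : String) : Option (Int × String) :=
  let c := if p == "warn" || p == "warning" then "medium" else p
  (PySem.Dict.get? pvRANK c).map (fun r => (r, c))

def pvMerge : Option (Int × String) → Option (Int × String) → Option (Int × String)
  | none, b => b
  | some a, none => some a
  | some (ar, ac), some (br, bc) => if br < ar then some (br, bc) else some (ar, ac)

def pvGSpec (parts : List String) : Option (Int × String) :=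
  if parts.contains "critical" then some (0, "critical")
  else if parts.contains "high" then some (1, "high")
  else if parts.contains "warn" || parts.contains "warning" || parts.contains "medium" then some (2, "medium")
  else if parts.contains "low" then some (3, "low")
  else if parts.contains "info" then some (4, "info")
  else none

theorem pvStep_eq_merge (best : Option (Int × String)) (p : String) :
    pvStep best p = pvMerge best (pvCand p) := by
  rcases best with _ | ⟨br, bc⟩ <;>
    cases hg : PySem.Dict.get? pvRANK (if p == "warn" || p == "warning" then "medium" else p) <;>
    simp only [pvStep, pvCand, pvMerge, hg, Option.map]

theorem pvMerge_none_right (a : Option (Int × String)) : pvMerge a none = a := by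
  cases a <;> rfl

theorem pvMerge_assoc (a b c : Option (Int × String)) :
    pvMerge (pvMerge a b) c = pvMerge a (pvMerge b c) := by
  rcases a with _ | ⟨ar, ac⟩ <;> rcases b with _ | ⟨br, bc⟩ <;> rcases c with _ | ⟨cr, cc⟩ <;>
    first
    | rfl
    | rw [pvMerge_none_right, pvMerge_none_right]
    | (by_cases h1 : br < ar <;> by_cases h2 : cr < br <;> by_cases h3 : cr < ar <;>
        simp [pvMerge, h1, h2, h3] <;> first | rfl | omega)

theorem pvFoldl_merge (parts : List String) (acc : Option (Int × String)) :
    parts.foldl pvStep acc = pvMerge acc (parts.foldl pvStep none) := by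
  induction parts generalizing acc with
  | nil => simp [List.foldl, pvMerge_none_right]
  | cons p rest ih =>
    simp only [List.foldl]
    rw [ih (pvStep acc p), ih (pvStep none p), pvStep_eq_merge acc p, pvStep_eq_merge none p]
    rw [show pvMerge none (pvCand p) = pvCand p from rfl, pvMerge_assoc]

theorem pvRANKmk : pvRANK = PySem.Dict.mk [("critical", 0), ("high", 1), ("medium", 2), ("low", 3), ("info", 4)] := by decide

theorem pvCand_cases (p : String) :
    pvCand p =
      if p = "critical" then some (0, "critical")
      else if p = "high" then some (1, "high")
      else if p = "warn" || p = "warning" || p = "medium" then some (2, "medium")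
      else if p = "low" then some (3, "low")
      else if p = "info" then some (4, "info")
      else none := by
  by_cases h1 : p = "critical" <;> by_cases h2 : p = "high" <;> by_cases h3 : p = "warn" <;>
    by_cases h4 : p = "warning" <;> by_cases h5 : p = "medium" <;> by_cases h6 : p = "low" <;>
    by_cases h7 : p = "info" <;>
    simp_all [pvCand, pvRANKmk, PySem.Dict.get?] <;>
    exact ⟨Ne.symm h1, Ne.symm h2, Ne.symm h5, Ne.symm h6, Ne.symm h7⟩

theorem pvMerge_cand (p : String) (rest : List String) :
    pvMerge (pvCand p) (pvGSpec rest) = pvGSpec (p :: rest) := by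
  rw [pvCand_cases]
  unfold pvGSpec
  by_cases h1 : p = "critical" <;> by_cases h2 : p = "high" <;> by_cases h3 : p = "warn" <;>
    by_cases h4 : p = "warning" <;> by_cases h5 : p = "medium" <;> by_cases h6 : p = "low" <;>
    by_cases h7 : p = "info" <;>
    simp_all [List.contains_cons, eq_comm (b := p), pvMerge] <;>
    split_ifs <;> simp_all [pvMerge]

theorem pvFold_eq_gspec (parts : List String) :
    parts.foldl pvStep none = pvGSpec parts := by
  induction parts with
  | nil => rfl
  | cons p rest ih =>
    simp only [List.foldl]
    rw [pvFoldl_merge, ih, pvStep_eq_merge]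
    simp only [pvMerge]
    exact pvMerge_cand p rest

theorem pvAlias_getD (s : String) :
    PySem.Dict.getD pvALIAS s s =
      if s == "warn" || s == "warning" then "medium"
      else if s == "crit" then "critical"
      else s := by
  have hA : pvALIAS = PySem.Dict.mk [("warn", "medium"), ("warning", "medium"), ("crit", "critical")] := by decide
  rw [hA, PySem.Dict.getD_eq_get?_getD]
  by_cases h1 : s = "warn" <;> by_cases h2 : s = "warning" <;> by_cases h3 : s = "crit"
  all_goals first
    | (simp [PySem.Dict.get?, h1, h2, h3]; done)
    | (have hf : List.find? (fun p : String × String => p.1 == s)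
            [("warn", "medium"), ("warning", "medium"), ("crit", "critical")] = none := by
          rw [List.find?_eq_none]
          rintro ⟨a, b⟩ hab
          fin_cases hab <;> simp [Ne.symm h1, Ne.symm h2, Ne.symm h3]
       simp [PySem.Dict.get?, hf, h1, h2, h3])

-- ===== VERDICT (by name: the statement is the Claim_ definition above) =====
theorem pvSlash_branch (parts : List String) :
    (if parts.contains "critical" then "critical"
     else if parts.contains "high" then "high"
     else if parts.contains "warn" || parts.contains "warning" || parts.contains "medium" then "medium"
     else if parts.contains "low" then "low"
     else if parts.contains "info" then "info"
     else match parts with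
       | [] => "unknown"
       | h :: _ => h) =
    (match pvGSpec parts with
     | some (_, c) => c
     | none => match parts with | [] => "unknown" | h :: _ => h) := by
  unfold pvGSpec
  split_ifs <;> rfl

-- both bodies, the shared lets zeta-expanded, over an abstract normalised string s
theorem pvBody_eq (s : String) :
    (if s == "" then "unknown"
     else if PySem.Str.isIn "/" s then
       (if ((((PySem.Str.split? s "/").getD []).map PySem.Str.strip).filter (fun q => !(q == ""))).contains "critical" then "critical"
        else if ((((PySem.Str.split? s "/").getD []).map PySem.Str.strip).filter (fun q => !(q == ""))).contains "high" then "high"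
        else if ((((PySem.Str.split? s "/").getD []).map PySem.Str.strip).filter (fun q => !(q == ""))).contains "warn" || ((((PySem.Str.split? s "/").getD []).map PySem.Str.strip).filter (fun q => !(q == ""))).contains "warning" || ((((PySem.Str.split? s "/").getD []).map PySem.Str.strip).filter (fun q => !(q == ""))).contains "medium" then "medium"
        else if ((((PySem.Str.split? s "/").getD []).map PySem.Str.strip).filter (fun q => !(q == ""))).contains "low" then "low"
        else if ((((PySem.Str.split? s "/").getD []).map PySem.Str.strip).filter (fun q => !(q == ""))).contains "info" then "info"
        else match ((((PySem.Str.split? s "/").getD []).map PySem.Str.strip).filter (fun q => !(q == ""))) with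
          | [] => "unknown"
          | h :: _ => h)
     else if s == "warn" || s == "warning" then "medium"
     else if s == "crit" then "critical"
     else if pvSEV_ORDER.contains s then s else s)
    =
    (if s == "" then "unknown"
     else if !(PySem.Str.isIn "/" s) then PySem.Dict.getD pvALIAS s s
     else
       match ((((PySem.Str.split? s "/").getD []).map PySem.Str.strip).filter (fun q => !(q == ""))).foldl pvStep none with
       | some (_, c) => c
       | none => match ((((PySem.Str.split? s "/").getD []).map PySem.Str.strip).filter (fun q => !(q == ""))) with
         | [] => "unknown"
         | h :: _ => h) := by
  by_cases h0 : (s == "") = true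
  · rw [if_pos h0, if_pos h0]
  · rw [if_neg h0, if_neg h0]
    by_cases hsl : (PySem.Str.isIn "/" s) = true
    · have hns : ¬((!(PySem.Str.isIn "/" s)) = true) := by rw [hsl]; decide
      rw [if_pos hsl, if_neg hns, pvFold_eq_gspec]
      exact pvSlash_branch _
    · have hfalse : PySem.Str.isIn "/" s = false := by
        cases hb : PySem.Str.isIn "/" s
        · rfl
        · exact absurd hb hsl
      have hns : (!(PySem.Str.isIn "/" s)) = true := by rw [hfalse]; rfl
      rw [if_neg hsl, if_pos hns, pvAlias_getD]
      split_ifs <;> rfl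

theorem normalise_sev_spec : Claim_equal_normalise_sev := by
  intro raw _
  unfold Spec_normalise_sev normalise_sev normalise_sev_alt
  generalize PySem.Str.lower (PySem.Str.strip (if raw == "" then "" else raw)) = s
  exact pvBody_eq s
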